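-- pv_equiv track=rewrite | github.com/qalle2/qromp | qromp.py | bps_enc_generate_blocks
-- ===== SOURCE A (Python) =====
-- def bps_enc_generate_blocks(data1, data2):
--     # generate (start, length) of blocks that differ
--
--     start = -1  # start position of current block (-1 = none)
--
--     # note: pos has an extra value at the end for wrapping things up
--     for pos in range(len(data1) + 1):
--         if start == -1 and pos < len(data1) and data1[pos] != data2[pos]:
--             # start a block
--             start = pos
--         elif start != -1 and (pos == len(data1) or data1[pos] == data2[pos]):
--             # end a block
--             yield (start, pos - start)
--             start = -1
--         elif start != -1 and pos - start == 0xffff: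
--             # break up a long block
--             yield (start, pos - start)
--             start = pos
-- ===== SOURCE B (Python) =====
-- def bps_enc_generate_blocks(data1, data2):
--     # nested-loop run finder: outer loop skips equal positions, inner loop
--     # extends a differing run up to 0xffff bytes, then yields it
--     n = len(data1)
--     pos = 0
--     while pos < n:
--         if data1[pos] == data2[pos]:
--             pos += 1
--         else:
--             start = pos
--             pos += 1
--             while pos < n and data1[pos] != data2[pos] and pos - start < 0xffff:
--                 pos += 1
--             yield (start, pos - start)
-- ===== Notes on version B (the rewrite author's own statement) =====
-- stated objective: simpler
-- what changed: Replaces A's flat state machine over range(len+1) with a -1 sentinel and three guarded branches by two plain nested loops: the outer loop skips equal positions, the inner loop extends a differing run (capped at 0xffff) and yields it.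
import Mathlib
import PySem

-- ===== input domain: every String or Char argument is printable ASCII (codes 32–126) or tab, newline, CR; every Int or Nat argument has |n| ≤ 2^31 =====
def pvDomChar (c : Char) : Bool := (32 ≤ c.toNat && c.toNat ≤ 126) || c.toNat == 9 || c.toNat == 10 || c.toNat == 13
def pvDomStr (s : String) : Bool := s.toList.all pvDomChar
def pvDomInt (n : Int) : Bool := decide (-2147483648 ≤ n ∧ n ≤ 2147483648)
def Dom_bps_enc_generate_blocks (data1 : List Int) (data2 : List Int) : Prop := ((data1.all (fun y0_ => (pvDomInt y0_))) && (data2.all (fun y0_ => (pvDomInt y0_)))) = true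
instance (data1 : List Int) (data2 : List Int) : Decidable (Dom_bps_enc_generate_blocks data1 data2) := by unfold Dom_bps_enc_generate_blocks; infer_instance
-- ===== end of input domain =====

-- B replaces A's sentinel state machine by two nested loops (skip-equal outer loop,
-- run-extending inner loop); same O(n) cost, simpler control flow.
-- Both Pythons raise IndexError when len(data2) < len(data1); Pre_ excludes exactly those inputs.

-- ===== PORT A =====
-- one step of A's for-loop body: state = (start, blocks yielded so far)
def pvStepA (data1 data2 : List Int) (st : Int × List (Int × Int)) (pos : Nat) : Int × List (Int × Int) :=
  if st.1 = -1 ∧ pos < data1.length ∧ data1.getD pos 0 ≠ data2.getD pos 0 then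
    ((pos : Int), st.2)
  else if st.1 ≠ -1 ∧ (pos = data1.length ∨ data1.getD pos 0 = data2.getD pos 0) then
    (-1, st.2 ++ [(st.1, (pos : Int) - st.1)])
  else if st.1 ≠ -1 ∧ (pos : Int) - st.1 = 0xffff then
    ((pos : Int), st.2 ++ [(st.1, (pos : Int) - st.1)])
  else st

def bps_enc_generate_blocks (data1 : List Int) (data2 : List Int) : List (Int × Int) :=
  ((List.range (data1.length + 1)).foldl (pvStepA data1 data2) (-1, [])).2

-- ===== PORT B =====
-- inner while loop: extend the run starting at `start` from `pos`; returns the final pos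
def pvScanB (data1 data2 : List Int) (start pos : Nat) : Nat :=
  if pos < data1.length ∧ data1.getD pos 0 ≠ data2.getD pos 0 ∧ pos - start < 0xffff then
    pvScanB data1 data2 start (pos + 1)
  else pos
termination_by data1.length - pos
decreasing_by omega

-- needed only for pvOuterB's termination
theorem pvScanB_ge (data1 data2 : List Int) (start pos : Nat) : pos ≤ pvScanB data1 data2 start pos := by
  fun_induction pvScanB data1 data2 start pos with
  | case1 _ _ ih => omega
  | case2 => omega

-- outer while loop
def pvOuterB (data1 data2 : List Int) (pos : Nat) : List (Int × Int) :=
  if _h : pos < data1.length then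
    if data1.getD pos 0 = data2.getD pos 0 then pvOuterB data1 data2 (pos + 1)
    else
      let e := pvScanB data1 data2 pos (pos + 1)
      ((pos : Int), (e : Int) - (pos : Int)) :: pvOuterB data1 data2 e
  else []
termination_by data1.length - pos
decreasing_by
  · omega
  · have := pvScanB_ge data1 data2 pos (pos + 1); omega

def bps_enc_generate_blocks_alt (data1 : List Int) (data2 : List Int) : List (Int × Int) :=
  pvOuterB data1 data2 0

-- ===== PRECONDITION & SPEC =====
-- Pre_ excludes exactly the inputs where the Python A raises IndexError (data2 shorter than data1)
def Pre_bps_enc_generate_blocks (data1 : List Int) (data2 : List Int) : Prop :=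
  data1.length ≤ data2.length
instance (data1 : List Int) (data2 : List Int) : Decidable (Pre_bps_enc_generate_blocks data1 data2) := by unfold Pre_bps_enc_generate_blocks; infer_instance

def pvWitness_bps_enc_generate_blocks : List Int × List Int := ([1, 2, 3], [1, 5, 3])

def Spec_bps_enc_generate_blocks (data1 : List Int) (data2 : List Int) (out : List (Int × Int)) : Prop := out = bps_enc_generate_blocks_alt data1 data2
instance (data1 : List Int) (data2 : List Int) (out : List (Int × Int)) : Decidable (Spec_bps_enc_generate_blocks data1 data2 out) := by unfold Spec_bps_enc_generate_blocks; infer_instance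

-- ===== CLAIM (what is proved, stated in full; the proofs are below) =====
def Claim_equal_bps_enc_generate_blocks : Prop := ∀ (data1 : List Int) (data2 : List Int), Dom_bps_enc_generate_blocks data1 data2 → Pre_bps_enc_generate_blocks data1 data2 → Spec_bps_enc_generate_blocks data1 data2 (bps_enc_generate_blocks data1 data2)

-- ===== LEMMAS AND PROOFS =====

-- joint invariant: folding A's step over positions [pos, n] equals B's loops,
-- both when no block is open (start = -1) and when a block opened at s₀ < pos
theorem pv_main (data1 data2 : List Int) :
    ∀ k pos, data1.length - pos = k → pos ≤ data1.length →
      (∀ acc, ((List.range' pos (data1.length + 1 - pos)).foldl (pvStepA data1 data2) (-1, acc)).2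
          = acc ++ pvOuterB data1 data2 pos) ∧
      (∀ acc (s₀ : Nat), s₀ < pos → pos - s₀ ≤ 0xffff →
        ((List.range' pos (data1.length + 1 - pos)).foldl (pvStepA data1 data2) ((s₀ : Int), acc)).2
          = acc ++ ((s₀ : Int), ((pvScanB data1 data2 s₀ pos : Int)) - (s₀ : Int))
                :: pvOuterB data1 data2 (pvScanB data1 data2 s₀ pos)) := by
  intro k
  induction k with
  | zero =>
    intro pos hk hle
    have hpos : pos = data1.length := by omega
    subst hpos
    have hone : data1.length + 1 - data1.length = 1 := by omega
    rw [hone, List.range'_one]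
    have hout : pvOuterB data1 data2 data1.length = [] := by
      rw [pvOuterB, dif_neg (lt_irrefl _)]
    constructor
    · intro acc
      have hstep : pvStepA data1 data2 (-1, acc) data1.length = (-1, acc) := by
        unfold pvStepA
        rw [if_neg (fun h => absurd h.2.1 (lt_irrefl _)), if_neg (fun h => h.1 rfl),
           if_neg (fun h => h.1 rfl)]
      rw [List.foldl_cons, List.foldl_nil, hstep, hout, List.append_nil]
    · intro acc s₀ hs _
      have hsne : ((s₀ : Int)) ≠ -1 := by omega
      have hstep : pvStepA data1 data2 ((s₀ : Int), acc) data1.length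
          = (-1, acc ++ [((s₀ : Int), (data1.length : Int) - s₀)]) := by
        unfold pvStepA
        rw [if_neg (fun h => hsne h.1), if_pos ⟨hsne, Or.inl rfl⟩]
      have hscan : pvScanB data1 data2 s₀ data1.length = data1.length := by
        rw [pvScanB, if_neg (fun hC => absurd hC.1 (lt_irrefl _))]
      rw [List.foldl_cons, List.foldl_nil, hstep, hscan, hout]
  | succ k ih =>
    intro pos hk hle
    have hlt : pos < data1.length := by omega
    have hne : pos ≠ data1.length := by omega
    have hcons : List.range' pos (data1.length + 1 - pos)
        = pos :: List.range' (pos + 1) (data1.length + 1 - (pos + 1)) := by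
      rw [show data1.length + 1 - pos = (data1.length + 1 - (pos + 1)) + 1 by omega,
          List.range'_succ]
    obtain ⟨ihO, ihI⟩ := ih (pos + 1) (by omega) (by omega)
    constructor
    · intro acc
      rw [hcons, List.foldl_cons]
      by_cases heq : data1.getD pos 0 = data2.getD pos 0
      · have hstep : pvStepA data1 data2 (-1, acc) pos = (-1, acc) := by
          unfold pvStepA
          rw [if_neg (fun h => h.2.2 heq), if_neg (fun h => h.1 rfl), if_neg (fun h => h.1 rfl)]
        rw [hstep, ihO]
        conv_rhs => rw [pvOuterB]
        rw [dif_pos hlt, if_pos heq]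
      · have hstep : pvStepA data1 data2 (-1, acc) pos = ((pos : Int), acc) := by
          unfold pvStepA
          rw [if_pos ⟨rfl, hlt, heq⟩]
        rw [hstep, ihI acc pos (by omega) (by omega)]
        conv_rhs => rw [pvOuterB]
        rw [dif_pos hlt, if_neg heq]
    · intro acc s₀ hs hle2
      have hsne : ((s₀ : Int)) ≠ -1 := by omega
      rw [hcons, List.foldl_cons]
      by_cases heq : data1.getD pos 0 = data2.getD pos 0
      · -- the run ends here: A closes the block, B's scan stops
        have hstep : pvStepA data1 data2 ((s₀ : Int), acc) pos
            = (-1, acc ++ [((s₀ : Int), (pos : Int) - s₀)]) := by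
          unfold pvStepA
          rw [if_neg (fun h => hsne h.1), if_pos ⟨hsne, Or.inr heq⟩]
        have hscan : pvScanB data1 data2 s₀ pos = pos := by
          rw [pvScanB, if_neg (fun hC => hC.2.1 heq)]
        rw [hstep, ihO, hscan]
        conv_rhs => rw [pvOuterB]
        rw [dif_pos hlt, if_pos heq]
        simp
      · by_cases hmax : pos - s₀ = 0xffff
        · -- the block hits the 0xffff cap: both yield and restart at pos
          have hint : (pos : Int) - (s₀ : Int) = 0xffff := by omega
          have hstep : pvStepA data1 data2 ((s₀ : Int), acc) pos
              = ((pos : Int), acc ++ [((s₀ : Int), (pos : Int) - s₀)]) := by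
            unfold pvStepA
            rw [if_neg (fun h => hsne h.1),
               if_neg (fun h => h.2.elim (fun hp => hne hp) (fun he => heq he)),
               if_pos ⟨hsne, hint⟩]
          have hscan : pvScanB data1 data2 s₀ pos = pos := by
            rw [pvScanB, if_neg (fun hC => absurd hC.2.2 (by omega))]
          rw [hstep, ihI (acc ++ [((s₀ : Int), (pos : Int) - s₀)]) pos (by omega) (by omega),
             hscan]
          conv_rhs => rw [pvOuterB]
          rw [dif_pos hlt, if_neg heq]
          simp
        · -- the run continues: A keeps its state, B's scan advances
          have h3 : ¬((pos : Int) - (s₀ : Int) = 0xffff) := by omega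
          have hstep : pvStepA data1 data2 ((s₀ : Int), acc) pos = ((s₀ : Int), acc) := by
            unfold pvStepA
            rw [if_neg (fun h => hsne h.1),
               if_neg (fun h => h.2.elim (fun hp => hne hp) (fun he => heq he)),
               if_neg (fun h => h3 h.2)]
          have hscan : pvScanB data1 data2 s₀ pos = pvScanB data1 data2 s₀ (pos + 1) := by
            rw [pvScanB, if_pos ⟨hlt, heq, by omega⟩]
          rw [hstep, ihI acc s₀ (by omega) (by omega), hscan]
theorem bps_enc_generate_blocks_spec : Claim_equal_bps_enc_generate_blocks := by
  intro data1 data2 _ _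
  unfold Spec_bps_enc_generate_blocks bps_enc_generate_blocks bps_enc_generate_blocks_alt
  have h := (pv_main data1 data2 (data1.length - 0) 0 rfl (Nat.zero_le _)).1 []
  simpa [List.range_eq_range'] using h
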